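-- pv_equiv track=rewrite | github.com/adotdong29/CoordPy | coordpy/corruption_robust_carrier_v3.py | interleave_bits
-- ===== SOURCE A (Python) =====
-- from typing import Any, Sequence
--
-- def interleave_bits(
--         segment_bits: Sequence[Sequence[int]],
-- ) -> list[int]:
--     """Transpose segment-major to bit-major order.
--
--     Input: list of segments, each a list of bits.
--     Output: interleaved [seg0_bit0, seg1_bit0, ..., seg0_bit1, ...].
--     All segments must have equal length; shorter ones get zero-padded.
--     """
--     if not segment_bits:
--         return []
--     max_len = max(len(s) for s in segment_bits)
--     out: list[int] = []
--     for bit_idx in range(max_len):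
--         for seg_idx in range(len(segment_bits)):
--             seg = segment_bits[seg_idx]
--             if bit_idx < len(seg):
--                 out.append(int(seg[bit_idx]) & 1)
--             else:
--                 out.append(0)
--     return out
-- ===== SOURCE B (Python) =====
-- from typing import Any, Sequence
--
-- def interleave_bits(
--         segment_bits: Sequence[Sequence[int]],
-- ) -> list[int]:
--     """Transpose segment-major to bit-major order by scattering into a
--     pre-zeroed flat array (zero padding comes for free)."""
--     if not segment_bits:
--         return []
--     n = len(segment_bits)
--     max_len = max(len(s) for s in segment_bits)
--     out = [0] * (max_len * n)
--     for seg_idx, seg in enumerate(segment_bits):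
--         for bit_idx, b in enumerate(seg):
--             out[bit_idx * n + seg_idx] = int(b) & 1
--     return out
-- ===== Notes on version B (the rewrite author's own statement) =====
-- stated objective: simpler
-- what changed: B preallocates a zero-filled flat array of size max_len*num_segments and scatters each bit b&1 to position bit_idx*n+seg_idx in segment-major order, instead of A's bit-major gather with an explicit else-append-0 padding branch.
import Mathlib
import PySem

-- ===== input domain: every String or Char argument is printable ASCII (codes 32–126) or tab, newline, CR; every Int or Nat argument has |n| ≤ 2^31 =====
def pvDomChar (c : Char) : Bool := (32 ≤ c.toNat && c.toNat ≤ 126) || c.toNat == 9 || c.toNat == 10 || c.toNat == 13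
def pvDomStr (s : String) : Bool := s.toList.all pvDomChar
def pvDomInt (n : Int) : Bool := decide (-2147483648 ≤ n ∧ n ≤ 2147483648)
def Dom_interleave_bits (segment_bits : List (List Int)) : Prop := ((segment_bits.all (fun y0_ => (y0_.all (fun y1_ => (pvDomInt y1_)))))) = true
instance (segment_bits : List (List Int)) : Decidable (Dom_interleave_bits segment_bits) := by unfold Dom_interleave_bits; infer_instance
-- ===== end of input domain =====

-- B scatters b&1 into a pre-zeroed flat array instead of gathering bit-major with a pad branch; objective: simpler, same cost.

-- ===== PORT A =====
-- gather: for bit_idx in range(max_len): for seg_idx in range(len(segment_bits)): append bit or 0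
def interleave_bits (segment_bits : List (List Int)) : List Int :=
  if segment_bits.isEmpty then []
  else
    let max_len := (segment_bits.map List.length).foldl max 0
    (List.range max_len).foldl (fun out bit_idx =>
      (List.range segment_bits.length).foldl (fun out seg_idx =>
        let seg := segment_bits.getD seg_idx []
        if bit_idx < seg.length then out ++ [PySem.Int.band (seg.getD bit_idx 0) 1]
        else out ++ [0]) out) []

-- ===== PORT B =====
-- scatter: out = [0]*(max_len*n); out[bit_idx*n + seg_idx] = b & 1
def interleave_bits_alt (segment_bits : List (List Int)) : List Int :=
  if segment_bits.isEmpty then []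
  else
    let n := segment_bits.length
    let max_len := (segment_bits.map List.length).foldl max 0
    let out0 : List Int := List.replicate (max_len * n) 0
    (segment_bits.zipIdx).foldl (fun out p =>
      (p.1.zipIdx).foldl (fun out q =>
        out.set (q.2 * n + p.2) (PySem.Int.band q.1 1)) out) out0

-- ===== PRECONDITION & SPEC =====
def Spec_interleave_bits (segment_bits : List (List Int)) (out : List Int) : Prop := out = interleave_bits_alt segment_bits
instance (segment_bits : List (List Int)) (out : List Int) : Decidable (Spec_interleave_bits segment_bits out) := by unfold Spec_interleave_bits; infer_instance

-- ===== CLAIM (what is proved, stated in full; the proofs are below) =====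
def Claim_equal_interleave_bits : Prop := ∀ (segment_bits : List (List Int)), Dom_interleave_bits segment_bits → Spec_interleave_bits segment_bits (interleave_bits segment_bits)

-- ===== LEMMAS AND PROOFS =====

-- every element of a list is ≤ its foldl-max
theorem pv_le_foldl_max : ∀ (l : List Nat) (a x : Nat), x ∈ l → x ≤ l.foldl max a := by
  intro l
  induction l with
  | nil => intro a x h; cases h
  | cons b t ih =>
    intro a x h
    cases h with
    | head =>
      have key : ∀ (t2 : List Nat) (c : Nat), c ≤ t2.foldl max c := by
        intro t2
        induction t2 with
        | nil => simp
        | cons d t3 ih3 =>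
          intro c
          exact le_trans (le_max_left c d) (ih3 (max c d))
      exact le_trans (le_max_right a b) (key t (max a b))
    | tail _ h' => exact ih (max a b) x h'

-- fold that appends a singleton each step = append of a map
theorem pv_foldl_append_map {α β : Type} (f : List β → α → List β) (g : α → β)
    (hf : ∀ o i, f o i = o ++ [g i]) :
    ∀ (l : List α) (acc : List β), l.foldl f acc = acc ++ l.map g := by
  intro l
  induction l with
  | nil => simp
  | cons a t ih => intro acc; simp [List.foldl, hf, ih, List.append_assoc]

-- fold that appends a block each step = append of a flatMap
theorem pv_foldl_append_flat {α β : Type} (f : List β → α → List β) (g : α → List β)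
    (hf : ∀ o i, f o i = o ++ g i) :
    ∀ (l : List α) (acc : List β), l.foldl f acc = acc ++ l.flatMap g := by
  intro l
  induction l with
  | nil => simp
  | cons a t ih => intro acc; simp [List.foldl, hf, ih, List.append_assoc]

theorem pv_div_mod_eq (n s i k : Nat) (hs : s < n) :
    (k % n = s ∧ k / n = i) ↔ k = i * n + s := by
  constructor
  · rintro ⟨h1, h2⟩
    have h3 := Nat.div_add_mod k n
    rw [h1, h2, Nat.mul_comm] at h3
    omega
  · rintro rfl
    have hn : 0 < n := by omega
    constructor
    · rw [Nat.add_comm, Nat.add_mul_mod_self_right, Nat.mod_eq_of_lt hs]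
    · rw [Nat.add_comm, Nat.add_mul_div_right _ _ hn, Nat.div_eq_of_lt hs]; omega

-- block-of-n flatMap over range = single map over range (m*n)
theorem pv_flat_range (n : Nat) (hn : 0 < n) (h2 : Nat → Nat → Int) :
    ∀ m : Nat, (List.range m).flatMap (fun b => (List.range n).map (h2 b)) =
      (List.range (m * n)).map (fun k => h2 (k / n) (k % n)) := by
  intro m
  induction m with
  | zero => simp
  | succ m ih =>
    rw [List.range_succ, List.flatMap_append, ih]
    have : (m + 1) * n = m * n + n := by ring
    rw [this, List.range_add, List.map_append, List.map_map]
    congr 1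
    · simp only [List.flatMap_cons, List.flatMap_nil, List.append_nil]
      apply List.map_congr_left
      intro s hs
      have hs' : s < n := List.mem_range.mp hs
      have hd : (m * n + s) / n = m := by
        rw [Nat.add_comm, Nat.add_mul_div_right _ _ hn, Nat.div_eq_of_lt hs']; omega
      have hm : (m * n + s) % n = s := by
        rw [Nat.add_comm, Nat.add_mul_mod_self_right, Nat.mod_eq_of_lt hs']
      simp [hd, hm]

-- length is preserved by the inner scatter fold
theorem pv_inner_len (n s : Nat) :
    ∀ (seg : List Int) (i : Nat) (out : List Int),
      ((seg.zipIdx i).foldl (fun o q => o.set (q.2 * n + s) (PySem.Int.band q.1 1)) out).length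
        = out.length := by
  intro seg
  induction seg with
  | nil => simp
  | cons a t ih =>
    intro i out
    simp only [List.zipIdx_cons, List.foldl_cons]
    rw [ih]
    simp

-- inner scatter loop: what each cell of the result is
theorem pv_inner (n s m : Nat) (hs : s < n) :
    ∀ (seg : List Int) (i : Nat) (out : List Int), out.length = m * n →
      i + seg.length ≤ m → ∀ k : Nat,
      ((seg.zipIdx i).foldl (fun o q => o.set (q.2 * n + s) (PySem.Int.band q.1 1)) out)[k]? =
        if k % n = s ∧ i ≤ k / n ∧ k / n < i + seg.length then
          some (PySem.Int.band (seg.getD (k / n - i) 0) 1)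
        else out[k]? := by
  intro seg
  induction seg with
  | nil =>
    intro i out hlen hb k
    simp only [List.zipIdx_nil, List.foldl_nil, List.length_nil]
    rw [if_neg]; omega
  | cons a t ih =>
    intro i out hlen hb k
    simp only [List.zipIdx_cons, List.foldl_cons, List.length_cons] at *
    have hlen' : (out.set (i * n + s) (PySem.Int.band a 1)).length = m * n := by
      simp [hlen]
    rw [ih (i + 1) _ hlen' (by omega) k]
    have hwrite : i * n + s < out.length := by
      have h2 : (i + 1) * n ≤ m * n := mul_le_mul_right' (by omega : i + 1 ≤ m) n
      have h3 : (i + 1) * n = i * n + n := by ring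
      omega
    have hset : (out.set (i * n + s) (PySem.Int.band a 1))[k]? =
        if k = i * n + s then some (PySem.Int.band a 1) else out[k]? := by
      by_cases hk : k = i * n + s
      · subst hk; simp [List.getElem?_set_self, hwrite]
      · simp [List.getElem?_set_ne (by omega : i * n + s ≠ k), hk]
    by_cases h1 : k % n = s ∧ i + 1 ≤ k / n ∧ k / n < i + 1 + t.length
    · rw [if_pos h1, if_pos (by omega)]
      have : k / n - i = (k / n - (i + 1)) + 1 := by omega
      simp [this]
    · rw [if_neg h1, hset]
      by_cases hk : k = i * n + s
      · have hdm := (pv_div_mod_eq n s i k hs).mpr hk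
        have h0 : k / n - i = 0 := by omega
        rw [if_pos hk, h0, if_pos ⟨hdm.1, by omega, by omega⟩]
        simp
      · rw [if_neg hk, if_neg]
        intro hc
        obtain ⟨hc1, hc2, hc3⟩ := hc
        have : k / n = i ∨ (i + 1 ≤ k / n ∧ k / n < i + 1 + t.length) := by omega
        cases this with
        | inl h =>
          exact hk ((pv_div_mod_eq n s i k hs).mp ⟨hc1, h⟩)
        | inr h => exact h1 ⟨hc1, h.1, h.2⟩

-- outer scatter loop: what each cell of the result is
theorem pv_outer (n m : Nat) :
    ∀ (segs : List (List Int)) (j : Nat) (out : List Int), out.length = m * n →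
      j + segs.length ≤ n → (∀ seg ∈ segs, seg.length ≤ m) → ∀ k : Nat,
      ((segs.zipIdx j).foldl (fun out p =>
          (p.1.zipIdx).foldl (fun o q => o.set (q.2 * n + p.2) (PySem.Int.band q.1 1)) out) out)[k]? =
        if j ≤ k % n ∧ k % n < j + segs.length ∧ k / n < (segs.getD (k % n - j) []).length then
          some (PySem.Int.band ((segs.getD (k % n - j) []).getD (k / n) 0) 1)
        else out[k]? := by
  intro segs
  induction segs with
  | nil =>
    intro j out hlen hb hall k
    simp only [List.zipIdx_nil, List.foldl_nil, List.length_nil]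
    rw [if_neg]; omega
  | cons seg rest ih =>
    intro j out hlen hb hall k
    simp only [List.zipIdx_cons, List.foldl_cons, List.length_cons] at *
    have hj : j < n := by omega
    have hlen' := pv_inner_len n j seg 0 out
    rw [ih (j + 1) _ (by rw [hlen']; exact hlen) (by omega)
        (fun s hs => hall s (List.mem_cons_of_mem _ hs)) k]
    have hinner := pv_inner n j m hj seg 0 out hlen
      (by simpa using hall seg (List.mem_cons_self ..)) k
    simp only [Nat.zero_add, Nat.zero_le, true_and, Nat.sub_zero] at hinner
    by_cases h1 : j + 1 ≤ k % n ∧ k % n < j + 1 + rest.length ∧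
        k / n < (rest.getD (k % n - (j + 1)) []).length
    · rw [if_pos h1, if_pos]
      · have : k % n - j = (k % n - (j + 1)) + 1 := by omega
        simp [this]
      · have : k % n - j = (k % n - (j + 1)) + 1 := by omega
        refine ⟨by omega, by omega, ?_⟩
        rw [this]; simpa using h1.2.2
    · rw [if_neg h1, hinner]
      by_cases hk : k % n = j ∧ k / n < seg.length
      · have h0 : k % n - j = 0 := by omega
        rw [if_pos hk, h0, if_pos ⟨by omega, by omega, by simpa using hk.2⟩]
        simp
      · rw [if_neg hk, if_neg]
        intro ⟨hc1, hc2, hc3⟩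
        by_cases hkj : k % n = j
        · have h0 : k % n - j = 0 := by omega
          rw [h0] at hc3
          exact hk ⟨hkj, by simpa using hc3⟩
        · have hsucc : k % n - j = (k % n - (j + 1)) + 1 := by omega
          rw [hsucc] at hc3
          exact h1 ⟨by omega, by omega, by simpa using hc3⟩

-- A as a single map over range (max_len * n)
theorem pv_A_map (segment_bits : List (List Int)) (hne : segment_bits ≠ []) :
    interleave_bits segment_bits =
      (List.range ((segment_bits.map List.length).foldl max 0 * segment_bits.length)).map
        (fun k =>
          if k / segment_bits.length <
              (segment_bits.getD (k % segment_bits.length) []).length then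
            PySem.Int.band
              ((segment_bits.getD (k % segment_bits.length) []).getD
                (k / segment_bits.length) 0) 1
          else 0) := by
  have hn : 0 < segment_bits.length := List.length_pos_iff.mpr hne
  unfold interleave_bits
  rw [if_neg (by simp [hne])]
  rw [pv_foldl_append_flat _
      (fun b => (List.range segment_bits.length).map
        (fun s => if b < (segment_bits.getD s []).length then
            PySem.Int.band ((segment_bits.getD s []).getD b 0) 1 else 0))
      (fun o b => pv_foldl_append_map _ _
        (fun o2 s => by dsimp only; split <;> rfl) _ o)]
  rw [pv_flat_range segment_bits.length hn _]
  simp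

-- B pointwise
theorem pv_B_get (segment_bits : List (List Int)) (hne : segment_bits ≠ []) (k : Nat) :
    (interleave_bits_alt segment_bits)[k]? =
      ((List.range ((segment_bits.map List.length).foldl max 0 * segment_bits.length)).map
        (fun k =>
          if k / segment_bits.length <
              (segment_bits.getD (k % segment_bits.length) []).length then
            PySem.Int.band
              ((segment_bits.getD (k % segment_bits.length) []).getD
                (k / segment_bits.length) 0) 1
          else 0))[k]? := by
  have hn : 0 < segment_bits.length := List.length_pos_iff.mpr hne
  set n := segment_bits.length with hn_def
  set m := (segment_bits.map List.length).foldl max 0 with hm_def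
  have hmax : ∀ seg ∈ segment_bits, seg.length ≤ m := by
    intro seg hs
    exact pv_le_foldl_max _ 0 _ (List.mem_map_of_mem hs)
  unfold interleave_bits_alt
  rw [if_neg (by simp [hne])]
  rw [pv_outer n m segment_bits 0 (List.replicate (m * n) 0) (by simp) (by omega) hmax k]
  simp only [Nat.zero_le, Nat.zero_add, Nat.sub_zero, true_and]
  have hdm := Nat.div_add_mod k n
  by_cases hcond : k % n < n ∧ k / n < (segment_bits.getD (k % n) []).length
  · have hlt : k < m * n := by
      have hmem : (segment_bits.getD (k % n) []) ∈ segment_bits := by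
        rw [List.getD_eq_getElem _ _ (by omega)]
        exact List.getElem_mem _
      have hle : (segment_bits.getD (k % n) []).length ≤ m := hmax _ hmem
      have h2 : (k / n + 1) * n ≤ m * n := mul_le_mul_right' (by omega) n
      have h3 : (k / n + 1) * n = n * (k / n) + n := by ring
      omega
    rw [if_pos ⟨hcond.1, hcond.2⟩]
    have h2 : k / n < (segment_bits[k % n]?.getD []).length := by
      simpa [List.getD] using hcond.2
    simp [List.getElem?_map, List.getElem?_range, hlt, h2]
  · by_cases hk : k < m * n
    · have hmod : k % n < n := Nat.mod_lt _ hn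
      have hnc : ¬ (k / n < (segment_bits.getD (k % n) []).length) := by
        intro hc; exact hcond ⟨hmod, hc⟩
      rw [if_neg (by intro hc; exact hnc hc.2)]
      have h2 : ¬ k / n < (segment_bits[k % n]?.getD []).length := by
        simpa [List.getD] using hnc
      simp [List.getElem?_map, List.getElem?_range, List.getElem?_replicate, hk, h2]
    · have hmod : k % n < n := Nat.mod_lt _ hn
      have hnc : ¬ (k / n < (segment_bits.getD (k % n) []).length) := by
        intro hc
        have hmem : (segment_bits.getD (k % n) []) ∈ segment_bits := by
          rw [List.getD_eq_getElem _ _ (by omega)]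
          exact List.getElem_mem _
        have hle : (segment_bits.getD (k % n) []).length ≤ m := hmax _ hmem
        have h2 : (k / n + 1) * n ≤ m * n := mul_le_mul_right' (by omega) n
        have h3 : (k / n + 1) * n = n * (k / n) + n := by ring
        omega
      rw [if_neg (by intro hc; exact hnc hc.2)]
      simp [List.getElem?_map, List.getElem?_range, List.getElem?_replicate, hk]

theorem interleave_bits_spec : Claim_equal_interleave_bits := by
  intro segment_bits _
  unfold Spec_interleave_bits
  by_cases hne : segment_bits = []
  · subst hne; rfl
  · rw [pv_A_map segment_bits hne]
    exact (List.ext_getElem? (fun k => pv_B_get segment_bits hne k)).symm
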